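-- pv_equiv track=rewrite | github.com/charliexchen/OpenAI-Gym | projects/FUUU.py | areSameCharlieSlow
-- ===== SOURCE A (Python) =====
-- def areSameCharlieSlow(a, b):
--     hb = {}
--     for i in b:
--         if i not in hb:
--             hb[i] = 1
--         else:
--             hb[i] += 1
--     ha = {}
--     for i in a:
--         if i*i not in ha:
--             ha[i*i] = 1
--         else:
--             ha[i*i] += 1
--     return ha==hb
-- ===== SOURCE B (Python) =====
-- def areSameCharlieSlow(a, b):
--     return sorted(x * x for x in a) == sorted(b)
-- ===== Notes on version B (the rewrite author's own statement) =====
-- stated objective: simpler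
-- what changed: B compares the multiset of squares of a with b by sorting both sides and comparing the sorted lists, instead of building two frequency dictionaries and comparing them.
import Mathlib
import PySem

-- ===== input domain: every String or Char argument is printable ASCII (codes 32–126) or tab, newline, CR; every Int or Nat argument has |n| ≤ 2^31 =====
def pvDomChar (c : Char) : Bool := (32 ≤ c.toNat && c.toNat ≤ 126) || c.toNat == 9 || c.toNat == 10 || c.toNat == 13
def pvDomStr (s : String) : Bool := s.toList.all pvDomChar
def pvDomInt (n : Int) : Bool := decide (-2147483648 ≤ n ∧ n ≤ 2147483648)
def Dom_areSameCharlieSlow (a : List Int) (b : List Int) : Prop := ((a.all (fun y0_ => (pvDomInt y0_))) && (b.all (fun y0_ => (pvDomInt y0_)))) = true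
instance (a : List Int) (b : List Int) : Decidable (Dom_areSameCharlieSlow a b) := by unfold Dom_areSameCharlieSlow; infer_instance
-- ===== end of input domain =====

-- B compares the multiset of squares of a with b by sorting both sides instead of A's two frequency dictionaries (objective: simpler).

-- ===== PORT A =====
-- Python's `ha == hb` on dicts ignores insertion order: ported as order-insensitive lookup equality.
def pvDictEq (d e : PySem.Dict Int Int) : Bool :=
  d.keys.all (fun k => e.get? k == d.get? k) && e.keys.all (fun k => d.get? k == e.get? k)

def areSameCharlieSlow (a : List Int) (b : List Int) : Bool :=
  let hb := b.foldl (fun d i => if d.contains i then d.insert i (d.getD i 0 + 1) else d.insert i 1) PySem.Dict.empty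
  let ha := a.foldl (fun d i => if d.contains (i*i) then d.insert (i*i) (d.getD (i*i) 0 + 1) else d.insert (i*i) 1) PySem.Dict.empty
  pvDictEq ha hb

-- ===== PORT B =====
def areSameCharlieSlow_alt (a : List Int) (b : List Int) : Bool :=
  PySem.List.sorted (a.map (fun x => x*x)) (fun x => x) false == PySem.List.sorted b (fun x => x) false

-- ===== PRECONDITION & SPEC =====
def Spec_areSameCharlieSlow (a : List Int) (b : List Int) (out : Bool) : Prop := out = areSameCharlieSlow_alt a b
instance (a : List Int) (b : List Int) (out : Bool) : Decidable (Spec_areSameCharlieSlow a b out) := by unfold Spec_areSameCharlieSlow; infer_instance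

-- ===== CLAIM (what is proved, stated in full; the proofs are below) =====
def Claim_equal_areSameCharlieSlow : Prop := ∀ (a : List Int) (b : List Int), Dom_areSameCharlieSlow a b → Spec_areSameCharlieSlow a b (areSameCharlieSlow a b)

-- ===== LEMMAS AND PROOFS =====

-- A's branching counting loop over keys `key i` is the counter of the mapped list.
lemma pvLoop_eq_counter (l : List Int) (key : Int → Int) :
    l.foldl (fun d i => if d.contains (key i) then d.insert (key i) (d.getD (key i) 0 + 1) else d.insert (key i) 1) PySem.Dict.empty
      = PySem.Dict.counter (l.map key) := by
  rw [← PySem.Dict.foldl_insert_getD_add_one_eq_counter, List.foldl_map]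
  congr 1
  funext d i
  by_cases h : d.contains (key i) = true
  · simp [h]
  · simp only [Bool.not_eq_true] at h
    simp [h, PySem.Dict.getD_of_not_contains d (0:Int) h]

lemma pvCounter_get? (l : List Int) (v : Int) :
    (PySem.Dict.counter l).get? v = if v ∈ l then some (l.count v : Int) else none := by
  by_cases h : v ∈ l
  · have hc : (PySem.Dict.counter l).contains v = true := by
      simp [PySem.Dict.contains_iff_mem_keys, PySem.Dict.keys_counter, PySem.Set.mem_ofList, h]
    rw [PySem.Dict.contains_eq_isSome_get?] at hc
    rcases Option.isSome_iff_exists.mp hc with ⟨w, hw⟩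
    have hd := PySem.Dict.getD_of_get?_eq_some _ (0:Int) hw
    rw [PySem.Dict.getD_counter] at hd
    simp [h, hw, ← hd]
  · have hn : (PySem.Dict.counter l).get? v = none := by
      rw [PySem.Dict.get?_eq_none_iff_not_mem_keys]
      simp [PySem.Dict.keys_counter, PySem.Set.mem_ofList, h]
    simp [h, hn]

-- Python dict equality of two counters is multiset equality.
lemma pvDictEq_counter (xs ys : List Int) :
    pvDictEq (PySem.Dict.counter xs) (PySem.Dict.counter ys) = true ↔ xs.Perm ys := by
  unfold pvDictEq
  simp only [Bool.and_eq_true, List.all_eq_true, PySem.Dict.keys_counter, PySem.Set.mem_ofList,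
    pvCounter_get?]
  constructor
  · rintro ⟨h1, h2⟩
    rw [List.perm_iff_count]
    intro v
    by_cases hx : v ∈ xs
    · have h := h1 v hx
      by_cases hy : v ∈ ys
      · simp only [hx, hy, if_true, beq_iff_eq, Option.some.injEq] at h
        omega
      · simp [hx, hy] at h
    · by_cases hy : v ∈ ys
      · have h := h2 v hy
        simp [hx, hy] at h
      · simp [List.count_eq_zero_of_not_mem, hx, hy]
  · intro hp
    have hc := List.perm_iff_count.mp hp
    refine ⟨fun v hv => ?_, fun v hv => ?_⟩
    · simp [hv, hp.mem_iff.mp hv, hc v]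
    · simp [hv, hp.mem_iff.mpr hv, hc v]

-- ===== VERDICT (by name: the statement is the Claim_ definition above) =====
theorem areSameCharlieSlow_spec : Claim_equal_areSameCharlieSlow := by
  intro a b _
  show areSameCharlieSlow a b = areSameCharlieSlow_alt a b
  unfold areSameCharlieSlow areSameCharlieSlow_alt
  rw [pvLoop_eq_counter a (fun x => x*x), pvLoop_eq_counter b (fun x => x), List.map_id']
  rw [Bool.eq_iff_iff, beq_iff_eq, pvDictEq_counter,
    PySem.List.sorted_id_eq_sorted_id_iff_perm]
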